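-- pv_equiv track=rewrite | github.com/alyssa-tn/adagrams-py | adagrams/game.py | get_highest_word_score
-- ===== SOURCE A (Python) =====
-- WORD_LENGTH_BONUS_THRESHOLD = 7
--
-- WORD_LENGTH_BONUS_POINTS = 8
--
-- POINT_VALUES = {
--     'A': 1,
--     'B': 3,
--     'C': 3,
--     'D': 2,
--     'E': 1,
--     'F': 4,
--     'G': 2,
--     'H': 4,
--     'I': 1,
--     'J': 8,
--     'K': 5,
--     'L': 1,
--     'M': 3,
--     'N': 1,
--     'O': 1,
--     'P': 3,
--     'Q': 10,
--     'R': 1,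
--     'S': 1,
--     'T': 1,
--     'U': 1,
--     'V': 4,
--     'W': 4,
--     'X': 8,
--     'Y': 4,
--     'Z': 10
--     }
--
-- def score_and_sort_words(word_list):
--     """Return a tuple sorted by the scores."""
--     scores = {}
--     for word in word_list:
--         scores[word] = score_word(word)
--     sorted_scores = sorted(scores.items(), key=lambda x:x[1], reverse=True)
--
--     return sorted_scores
--
-- def score_word(word):
--     """Return the amount of points (integer) for a word."""
--     score = 0
--     if len(word) >= WORD_LENGTH_BONUS_THRESHOLD:
--         score += WORD_LENGTH_BONUS_POINTS
--     for letter in word: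
--         score += POINT_VALUES[letter.upper()]
--
--     return score
--
-- def get_highest_word_score(word_list):
--     """Return a tuple containing the winning word and corresponding score."""
--     sorted_scores = score_and_sort_words(word_list)
--     current_winner = sorted_scores[0]
--     word_index = 0
--     score_index = 1
--
--     for word_and_score in range(1, len(sorted_scores)):
--         comparator = sorted_scores[word_and_score]
--         if comparator[score_index] < current_winner[score_index]:
--             return current_winner
--         elif comparator[score_index] == current_winner[score_index]:
--             if len(current_winner[word_index]) == 10:
--                 return current_winner
--             elif len(comparator[word_index]) == 10:
--                 return comparator[word_index], comparator[score_index]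
--             elif len(current_winner[word_index]) < len(comparator[word_index]):
--                 continue
--             elif len(comparator[word_index]) < len(current_winner[word_index]):
--                 current_winner = comparator[word_index], comparator[score_index]
--
--     return current_winner
-- ===== SOURCE B (Python) =====
-- _LETTER_GROUPS = {1: "AEILNORSTU", 2: "DG", 3: "BCMP", 4: "FHVWY", 5: "K", 8: "JX", 10: "QZ"}
-- _POINTS = {ch: pts for pts, letters in _LETTER_GROUPS.items() for ch in letters}
--
--
-- def _score(word):
--     total = 8 if len(word) >= 7 else 0
--     for ch in word.upper():
--         total += _POINTS[ch]
--     return total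
--
--
-- def get_highest_word_score(word_list):
--     """Single linear pass: track the best score seen so far; on ties prefer a
--     10-letter word (then stop changing), otherwise the shortest, earliest word."""
--     words = list(dict.fromkeys(word_list))
--     best = words[0]
--     best_score = _score(best)
--     locked = False
--     for word in words[1:]:
--         s = _score(word)
--         if s > best_score:
--             best, best_score, locked = word, s, False
--         elif s == best_score and not locked:
--             if len(best) == 10:
--                 locked = True
--             elif len(word) == 10:
--                 best, locked = word, True
--             elif len(word) < len(best):
--                 best = word
--     return (best, best_score)
-- ===== Notes on version B (the rewrite author's own statement) =====
-- stated objective: faster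
-- what changed: B replaces A's build-a-dict + sort-all-words-by-score + scan-the-sorted-prefix pipeline with a single linear pass over the deduplicated words that tracks the best score and applies the length tie-break (10-letter lock, else shortest-earliest) on the fly, with no sorting.
import Mathlib
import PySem

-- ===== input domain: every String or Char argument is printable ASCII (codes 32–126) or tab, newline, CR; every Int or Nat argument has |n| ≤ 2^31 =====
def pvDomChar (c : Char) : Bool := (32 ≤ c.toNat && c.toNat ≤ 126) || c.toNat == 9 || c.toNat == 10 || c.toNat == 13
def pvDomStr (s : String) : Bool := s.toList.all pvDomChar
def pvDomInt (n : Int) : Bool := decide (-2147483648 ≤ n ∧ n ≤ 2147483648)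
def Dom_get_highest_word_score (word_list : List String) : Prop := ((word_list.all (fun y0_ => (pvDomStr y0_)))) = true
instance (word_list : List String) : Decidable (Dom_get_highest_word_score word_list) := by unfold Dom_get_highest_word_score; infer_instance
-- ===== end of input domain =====

-- B replaces A's dict+sort+scan pipeline by one linear pass (best score + tie-break
-- tracked on the fly, no sort); objective: faster. Pre_ excludes exactly the inputs
-- where A raises (empty list: IndexError; a non-letter character: KeyError).


-- ===== PORT A =====
def pvPointValues : PySem.Dict String Int :=
  PySem.Dict.ofList [("A",1),("B",3),("C",3),("D",2),("E",1),("F",4),("G",2),("H",4),("I",1),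
    ("J",8),("K",5),("L",1),("M",3),("N",1),("O",1),("P",3),("Q",10),("R",1),("S",1),("T",1),
    ("U",1),("V",4),("W",4),("X",8),("Y",4),("Z",10)]

-- score_word; POINT_VALUES[letter.upper()] would raise KeyError on a non-letter:
-- that is excluded by Pre_, so the lookup is ported with getD 0.
def pvScoreWord (word : String) : Int :=
  let score : Int := 0
  let score := if 7 ≤ PySem.Str.len word then score + 8 else score
  word.toList.foldl
    (fun s letter => s + ((pvPointValues.get? (PySem.Str.upper (String.singleton letter))).getD 0))
    score

def pvScoreAndSortWords (word_list : List String) : List (String × Int) :=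
  let scores := word_list.foldl (fun d word => d.insert word (pvScoreWord word)) PySem.Dict.empty
  PySem.List.sorted scores.items (fun x => x.2) true

-- the 'for word_and_score in range(1, len(sorted_scores))' loop with its early returns
def pvScanA : String × Int → List (String × Int) → String × Int
  | cur, [] => cur
  | cur, c :: t =>
    if c.2 < cur.2 then cur
    else if c.2 == cur.2 then
      if PySem.Str.len cur.1 == 10 then cur
      else if PySem.Str.len c.1 == 10 then (c.1, c.2)
      else if PySem.Str.len cur.1 < PySem.Str.len c.1 then pvScanA cur t
      else if PySem.Str.len c.1 < PySem.Str.len cur.1 then pvScanA (c.1, c.2) t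
      else pvScanA cur t
    else pvScanA cur t

def get_highest_word_score (word_list : List String) : String × Int :=
  match pvScoreAndSortWords word_list with
  | [] => ("", 0)            -- Python raises IndexError here; excluded by Pre_
  | cur :: rest => pvScanA cur rest

-- ===== PORT B =====
def pvLetterGroups : List (Int × String) :=
  [(1, "AEILNORSTU"), (2, "DG"), (3, "BCMP"), (4, "FHVWY"), (5, "K"), (8, "JX"), (10, "QZ")]

def pvPointsB : PySem.Dict Char Int :=
  PySem.Dict.ofList (pvLetterGroups.flatMap (fun p => p.2.toList.map (fun ch => (ch, p.1))))

-- _score; _POINTS[ch] would raise KeyError on a non-letter: excluded by Pre_, getD 0.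
def pvScoreB (word : String) : Int :=
  let total : Int := if 7 ≤ PySem.Str.len word then 8 else 0
  (PySem.Str.upper word).toList.foldl (fun t ch => t + (pvPointsB.get? ch).getD 0) total

def pvStepB (st : String × Int × Bool) (word : String) : String × Int × Bool :=
  let s := pvScoreB word
  if st.2.1 < s then (word, s, false)
  else if s == st.2.1 && !st.2.2 then
    if PySem.Str.len st.1 == 10 then (st.1, st.2.1, true)
    else if PySem.Str.len word == 10 then (word, st.2.1, true)
    else if PySem.Str.len word < PySem.Str.len st.1 then (word, st.2.1, st.2.2)
    else st
  else st

def get_highest_word_score_alt (word_list : List String) : String × Int :=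
  match PySem.List.dedup word_list with
  | [] => ("", 0)            -- Python raises IndexError here; excluded by Pre_
  | w :: t =>
    let r := t.foldl pvStepB (w, pvScoreB w, false)
    (r.1, r.2.1)

-- ===== PRECONDITION & SPEC =====
def pvLetters : List Char :=
  ['A','B','C','D','E','F','G','H','I','J','K','L','M','N','O','P','Q','R','S','T','U','V','W','X','Y','Z',
   'a','b','c','d','e','f','g','h','i','j','k','l','m','n','o','p','q','r','s','t','u','v','w','x','y','z']

-- Exactly the inputs where A returns: a nonempty list (else IndexError) of words
-- whose characters are ASCII letters (else KeyError in POINT_VALUES[letter.upper()]).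
def Pre_get_highest_word_score (word_list : List String) : Prop :=
  word_list ≠ [] ∧ (word_list.all (fun w => w.toList.all (fun c => pvLetters.contains c))) = true
instance (word_list : List String) : Decidable (Pre_get_highest_word_score word_list) := by
  unfold Pre_get_highest_word_score; infer_instance

def pvWitness_get_highest_word_score : List String := ["cat", "Dog", "z"]

def Spec_get_highest_word_score (word_list : List String) (out : String × Int) : Prop := out = get_highest_word_score_alt word_list
instance (word_list : List String) (out : String × Int) : Decidable (Spec_get_highest_word_score word_list out) := by unfold Spec_get_highest_word_score; infer_instance

-- ===== CLAIM (what is proved, stated in full; the proofs are below) =====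
def Claim_equal_get_highest_word_score : Prop := ∀ (word_list : List String), Dom_get_highest_word_score word_list → Pre_get_highest_word_score word_list → Spec_get_highest_word_score word_list (get_highest_word_score word_list)

-- ===== LEMMAS AND PROOFS =====

-- the common tie-break machine both scans reduce to (proof helper, not a port)
def pvRunTie : String → List String → String
  | b, [] => b
  | b, w :: t =>
    if PySem.Str.len b == 10 then b
    else if PySem.Str.len w == 10 then w
    else if PySem.Str.len w < PySem.Str.len b then pvRunTie w t
    else pvRunTie b t

def pvHeadRun : List String → String
  | [] => ""
  | g :: gs => pvRunTie g gs

theorem pvRunTie_len10 (b : String) (l : List String) (h : PySem.Str.len b = 10) :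
    pvRunTie b l = b := by
  have h2 : ((b.length : Int)) = 10 := by simpa [PySem.Str.len_eq] using h
  cases l <;> simp [pvRunTie, h2]

-- per-letter agreement of the two scoring tables, on letters
set_option maxHeartbeats 1000000 in
theorem pvPoint_eq : ∀ c ∈ pvLetters,
    ((pvPointValues.get? (PySem.Str.upper (String.singleton c))).getD 0)
      = ((pvPointsB.get? (PySem.Chars.upperChar c)).getD 0) := by
  have h : (pvLetters.all (fun c =>
      ((pvPointValues.get? (PySem.Str.upper (String.singleton c))).getD 0)
        == ((pvPointsB.get? (PySem.Chars.upperChar c)).getD 0))) = true := by decide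
  intro c hc
  simpa using List.all_eq_true.mp h c hc

-- the two score functions agree on words made of letters
theorem pvScore_eq (w : String) (hw : ∀ c ∈ w.toList, c ∈ pvLetters) :
    pvScoreB w = pvScoreWord w := by
  unfold pvScoreB pvScoreWord
  rw [show (PySem.Str.upper w).toList = w.toList.map PySem.Chars.upperChar from by
        simp [PySem.Str.upper, PySem.Chars.upper]]
  rw [List.foldl_map]
  simp only [zero_add]
  exact PySem.List.foldl_congr_mem _ _ _ _ (fun acc x hx => by rw [pvPoint_eq x (hw x hx)])

-- the dict built by A holds exactly the deduplicated words with their scores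
theorem pvItems_fold (xs : List String) : ∀ s : List String,
    ((xs.foldl (fun d w => d.insert w (pvScoreWord w))
        (PySem.Dict.mk (s.map (fun v => (v, pvScoreWord v))) : PySem.Dict String Int)).items)
      = (xs.foldl PySem.Set.add s).map (fun v => (v, pvScoreWord v)) := by
  induction xs with
  | nil => intro s; rfl
  | cons w xs ih =>
    intro s
    have hc : (PySem.Dict.mk (s.map (fun v => (v, pvScoreWord v))) : PySem.Dict String Int).contains w
        = s.contains w := by
      simp [PySem.Dict.contains, List.any_map, Function.comp_def, List.any_beq', List.contains_eq_mem]
    simp only [List.foldl_cons, PySem.Dict.insert, hc, PySem.Set.add, PySem.Set.contains]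
    by_cases h : s.contains w = true
    · have hmap : (s.map (fun v => (v, pvScoreWord v))).map
          (fun p => if p.1 == w then (w, pvScoreWord w) else p)
          = s.map (fun v => (v, pvScoreWord v)) := by
        rw [List.map_map]
        refine List.map_congr_left (fun v _ => ?_)
        by_cases hv : v = w
        · subst hv; simp
        · simp [Function.comp, hv]
      simp only [h, if_true, hmap]
      exact ih s
    · simp only [h, if_false, Bool.false_eq_true]
      have : (s.map (fun v => (v, pvScoreWord v))) ++ [(w, pvScoreWord w)]
          = (s ++ [w]).map (fun v => (v, pvScoreWord v)) := by simp
      rw [this]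
      exact ih (s ++ [w])

-- stability of Python's sort: filtering one key class commutes with sorting
theorem pvFilter_insertBy (k : Int) : ∀ (ys : List (String × Int)) (x : String × Int),
    ys.Pairwise (fun a b => b.2 ≤ a.2) →
    (PySem.List.insertBy (fun a b => decide (b.2 < a.2)) x ys).filter (fun y => y.2 == k)
      = ys.filter (fun y => y.2 == k) ++ (if x.2 == k then [x] else []) := by
  intro ys
  induction ys with
  | nil =>
    intro x _
    by_cases hk : (x.2 == k) = true <;> simp [PySem.List.insertBy, hk]
  | cons y ys ih =>
    intro x hp
    by_cases hlt : y.2 < x.2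
    · rw [show PySem.List.insertBy (fun a b => decide (b.2 < a.2)) x (y :: ys) = x :: y :: ys from by
          simp [PySem.List.insertBy, hlt]]
      by_cases hk : x.2 = k
      · have hall : ∀ z ∈ y :: ys, z.2 < k := by
          intro z hz
          rcases List.mem_cons.mp hz with hz | hz
          · subst hz; omega
          · have := List.rel_of_pairwise_cons hp hz; omega
        have hnil : (y :: ys).filter (fun y => y.2 == k) = [] := by
          refine List.filter_eq_nil_iff.mpr (fun z hz => ?_)
          have := hall z hz; simp; omega
        simp [hnil, hk]
      · have hk' : (x.2 == k) = false := by simp [hk]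
        simp [List.filter_cons, hk']
    · rw [show PySem.List.insertBy (fun a b => decide (b.2 < a.2)) x (y :: ys)
            = y :: PySem.List.insertBy (fun a b => decide (b.2 < a.2)) x ys from by
          simp [PySem.List.insertBy, hlt]]
      simp only [List.filter_cons]
      rw [ih x (List.pairwise_cons.mp hp).2]
      by_cases hy : (y.2 == k) = true <;> simp [hy]

theorem pvFilter_sorted_rev (xs : List (String × Int)) (k : Int) :
    (PySem.List.sorted xs (fun p => p.2) true).filter (fun y => y.2 == k)
      = xs.filter (fun y => y.2 == k) := by
  induction xs using List.reverseRecOn with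
  | nil => rw [(PySem.List.sorted_eq_nil_iff [] _ true).mpr rfl]
  | append_singleton xs x ih =>
    rw [PySem.List.sorted_rev_eq_foldl_insertBy, List.foldl_append, List.foldl_cons, List.foldl_nil,
        ← PySem.List.sorted_rev_eq_foldl_insertBy]
    rw [pvFilter_insertBy k _ x (PySem.List.sorted_pairwise_rev xs _), ih, List.filter_append]
    simp [List.filter_cons]

-- A's scan ignores the strictly-lower-score suffix
theorem pvScanA_split (M : Int) : ∀ (pt : List (String × Int)) (cur : String × Int)
    (R : List (String × Int)), cur.2 = M → (∀ p ∈ pt, p.2 = M) → (∀ r ∈ R, r.2 < M) →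
    pvScanA cur (pt ++ R) = pvScanA cur pt := by
  intro pt
  induction pt with
  | nil =>
    intro cur R hc hp hr
    cases R with
    | nil => rfl
    | cons r t =>
      have hrr := hr r (by simp)
      simp only [List.nil_append, pvScanA]
      rw [if_pos (by omega)]
  | cons c pt ih =>
    intro cur R hc hp hr
    have hcM : c.2 = M := hp c (by simp)
    have hne : ¬ (c.2 < cur.2) := by omega
    have heq : (c.2 == cur.2) = true := by simp; omega
    simp only [List.cons_append, pvScanA, hne, heq, if_false, if_true]
    split_ifs with h10 hc10 hl1 hl2
    · rfl
    · rfl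
    · exact ih cur R hc (fun p hp' => hp p (by simp [hp'])) hr
    · exact ih (c.1, c.2) R hcM (fun p hp' => hp p (by simp [hp'])) hr
    · exact ih cur R hc (fun p hp' => hp p (by simp [hp'])) hr

-- A's scan on the equal-score group is the tie-break machine
theorem pvScanA_runTie (M : Int) : ∀ (pt : List (String × Int)) (cur : String × Int),
    cur.2 = M → (∀ p ∈ pt, p.2 = M) →
    pvScanA cur pt = (pvRunTie cur.1 (pt.map (fun p => p.1)), M) := by
  intro pt
  induction pt with
  | nil =>
    intro cur hc _
    rw [← hc]
    simp [pvScanA, pvRunTie]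
  | cons c pt ih =>
    intro cur hc hp
    have hcM : c.2 = M := hp c (by simp)
    have hne : ¬ (c.2 < cur.2) := by omega
    have heq : (c.2 == cur.2) = true := by simp; omega
    simp only [pvScanA, List.map_cons, pvRunTie, hne, heq, if_false, if_true]
    by_cases h10 : (PySem.Str.len cur.1 == 10) = true
    · simp only [if_pos h10]
      rw [← hc]
    · simp only [if_neg h10]
      by_cases hc10 : (PySem.Str.len c.1 == 10) = true
      · simp only [if_pos hc10]
        rw [← hcM]
      · simp only [if_neg hc10]
        by_cases hl1 : PySem.Str.len cur.1 < PySem.Str.len c.1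
        · have hnl : ¬ PySem.Str.len c.1 < PySem.Str.len cur.1 := by omega
          simp only [if_pos hl1, if_neg hnl]
          exact ih cur hc (fun p hp' => hp p (by simp [hp']))
        · simp only [if_neg hl1]
          by_cases hl2 : PySem.Str.len c.1 < PySem.Str.len cur.1
          · simp only [if_pos hl2]
            exact ih (c.1, c.2) hcM (fun p hp' => hp p (by simp [hp']))
          · simp only [if_neg hl2]
            exact ih cur hc (fun p hp' => hp p (by simp [hp']))

-- B's single pass computes the tie-break machine on the max-score group
theorem pvBMain : ∀ (t : List String) (b : String) (s : Int) (lk : Bool),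
    pvScoreB b = s → (lk = true → PySem.Str.len b = 10) →
    (let r := t.foldl pvStepB (b, s, lk); ((r.1, r.2.1) : String × Int)) =
    (let M := t.foldl (fun a w => max a (pvScoreB w)) s;
     if M = s then ((pvRunTie b (t.filter (fun w => pvScoreB w == s)), s) : String × Int)
     else (pvHeadRun (t.filter (fun w => pvScoreB w == M)), M)) := by
  intro t
  induction t with
  | nil =>
    intro b s lk hs hlk
    simp [pvRunTie]
  | cons w t ih =>
    intro b s lk hs hlk
    simp only [List.foldl_cons]
    rcases lt_trichotomy (pvScoreB w) s with hw | hw | hw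
    · -- strictly smaller score: the step is a no-op and w drops out of every filter
      have h1 : ¬ (s < pvScoreB w) := by omega
      have h2 : (pvScoreB w == s) = false := by simp; omega
      have hsle := (PySem.List.le_foldl_max_int t pvScoreB s).1
      have hmax : max s (pvScoreB w) = s := by omega
      simp only [pvStepB, if_neg h1, h2, Bool.false_and, Bool.false_eq_true, if_false]
      rw [ih b s lk hs hlk]
      simp only [hmax]
      by_cases hM : t.foldl (fun a w => max a (pvScoreB w)) s = s
      · rw [if_pos hM, if_pos hM, List.filter_cons, h2]
        simp only [Bool.false_eq_true, if_false]
      · rw [if_neg hM, if_neg hM, List.filter_cons,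
            show (pvScoreB w == t.foldl (fun a w => max a (pvScoreB w)) s) = false from by
              simp; omega]
        simp only [Bool.false_eq_true, if_false]
    · -- equal score: a tie step
      have h1 : ¬ (s < pvScoreB w) := by omega
      have h2 : (pvScoreB w == s) = true := by simp [hw]
      have hsle := (PySem.List.le_foldl_max_int t pvScoreB s).1
      have hmax : max s (pvScoreB w) = s := by omega
      have hdropM : ∀ hM : ¬ t.foldl (fun a w => max a (pvScoreB w)) s = s,
          (pvScoreB w == t.foldl (fun a w => max a (pvScoreB w)) s) = false := by
        intro hM; simp; omega
      simp only [pvStepB, if_neg h1, h2, Bool.true_and]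
      cases lk with
      | true =>
        have hb10 : PySem.Str.len b = 10 := hlk rfl
        simp only [Bool.not_true, Bool.false_eq_true, if_false]
        rw [ih b s true hs hlk]
        simp only [hmax]
        by_cases hM : t.foldl (fun a w => max a (pvScoreB w)) s = s
        · rw [if_pos hM, if_pos hM, List.filter_cons, h2]
          simp only [if_true]
          rw [pvRunTie_len10 _ _ hb10, pvRunTie_len10 _ _ hb10]
        · rw [if_neg hM, if_neg hM, List.filter_cons, hdropM hM]
          simp only [Bool.false_eq_true, if_false]
      | false =>
        simp only [Bool.not_false, if_true]
        by_cases hb10 : (PySem.Str.len b == 10) = true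
        · have hb10' : PySem.Str.len b = 10 := by simpa using hb10
          simp only [if_pos hb10]
          rw [ih b s true hs (fun _ => hb10')]
          simp only [hmax]
          by_cases hM : t.foldl (fun a w => max a (pvScoreB w)) s = s
          · rw [if_pos hM, if_pos hM, List.filter_cons, h2]
            simp only [if_true]
            rw [pvRunTie_len10 _ _ hb10', pvRunTie_len10 _ _ hb10']
          · rw [if_neg hM, if_neg hM, List.filter_cons, hdropM hM]
            simp only [Bool.false_eq_true, if_false]
        · simp only [if_neg hb10]
          by_cases hw10 : (PySem.Str.len w == 10) = true
          · have hw10' : PySem.Str.len w = 10 := by simpa using hw10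
            simp only [if_pos hw10]
            rw [ih w s true (by omega) (fun _ => hw10')]
            simp only [hmax]
            by_cases hM : t.foldl (fun a w => max a (pvScoreB w)) s = s
            · rw [if_pos hM, if_pos hM, List.filter_cons, h2]
              simp only [if_true, pvRunTie, if_neg hb10, if_pos hw10]
              rw [pvRunTie_len10 _ _ hw10']
            · rw [if_neg hM, if_neg hM, List.filter_cons, hdropM hM]
              simp only [Bool.false_eq_true, if_false]
          · simp only [if_neg hw10]
            by_cases hlen : PySem.Str.len w < PySem.Str.len b
            · simp only [if_pos hlen]
              rw [ih w s false (by omega) (fun h => by simp at h)]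
              simp only [hmax]
              by_cases hM : t.foldl (fun a w => max a (pvScoreB w)) s = s
              · rw [if_pos hM, if_pos hM, List.filter_cons, h2]
                simp only [if_true, pvRunTie, if_neg hb10, if_neg hw10, if_pos hlen]
              · rw [if_neg hM, if_neg hM, List.filter_cons, hdropM hM]
                simp only [Bool.false_eq_true, if_false]
            · simp only [if_neg hlen]
              rw [ih b s false hs (fun h => by simp at h)]
              simp only [hmax]
              by_cases hM : t.foldl (fun a w => max a (pvScoreB w)) s = s
              · rw [if_pos hM, if_pos hM, List.filter_cons, h2]
                simp only [if_true, pvRunTie, if_neg hb10, if_neg hw10, if_neg hlen]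
              · rw [if_neg hM, if_neg hM, List.filter_cons, hdropM hM]
                simp only [Bool.false_eq_true, if_false]
    · -- strictly greater score: reset
      simp only [pvStepB, if_pos hw]
      rw [ih w (pvScoreB w) false rfl (fun h => by simp at h)]
      have hmax : max s (pvScoreB w) = pvScoreB w := by omega
      simp only [hmax]
      have hle := (PySem.List.le_foldl_max_int t pvScoreB (pvScoreB w)).1
      have hMs : ¬ (t.foldl (fun a w => max a (pvScoreB w)) (pvScoreB w) = s) := by omega
      rw [if_neg hMs]
      by_cases hM : t.foldl (fun a w => max a (pvScoreB w)) (pvScoreB w) = pvScoreB w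
      · rw [if_pos hM, List.filter_cons, show (pvScoreB w ==
            t.foldl (fun a w => max a (pvScoreB w)) (pvScoreB w)) = true from by simp [hM]]
        simp only [if_true, pvHeadRun, hM]
      · rw [if_neg hM, List.filter_cons, show (pvScoreB w ==
            t.foldl (fun a w => max a (pvScoreB w)) (pvScoreB w)) = false from by simp; omega]
        simp only [Bool.false_eq_true, if_false]

-- ===== VERDICT (by name: the statement is the Claim_ definition above) =====
-- a list's dropWhile starts with an element failing the predicate
theorem pvDropWhile_head_false {α : Type} (p : α → Bool) :
    ∀ (l l' : List α) (r : α), l.dropWhile p = r :: l' → p r = false := by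
  intro l
  induction l with
  | nil => intro l' r h; simp [List.dropWhile] at h
  | cons a l ih =>
    intro l' r h
    by_cases hp : p a = true
    · rw [List.dropWhile_cons_of_pos hp] at h; exact ih _ _ h
    · simp only [List.dropWhile_cons, hp, Bool.false_eq_true, if_false] at h
      cases h
      simpa using hp

theorem get_highest_word_score_spec : Claim_equal_get_highest_word_score := by
  intro word_list _ hpre
  obtain ⟨hne, hall⟩ := hpre
  have hlet : ∀ w ∈ word_list, ∀ c ∈ w.toList, c ∈ pvLetters := by
    intro w hw c hc
    have h1 := List.all_eq_true.mp hall w hw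
    have h2 := List.all_eq_true.mp h1 c hc
    simpa using h2
  unfold Spec_get_highest_word_score
  cases hL : PySem.List.dedup word_list with
  | nil =>
    obtain ⟨x, hx⟩ := List.exists_mem_of_ne_nil word_list hne
    have h := (PySem.List.mem_dedup _ _).mpr hx
    rw [hL] at h
    cases h
  | cons w t =>
    have hmemL : ∀ v ∈ w :: t, v ∈ word_list := by
      intro v hv; rw [← hL] at hv; exact (PySem.List.mem_dedup _ _).mp hv
    have hscoreL : ∀ v ∈ w :: t, pvScoreB v = pvScoreWord v :=
      fun v hv => pvScore_eq v (hlet v (hmemL v hv))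
    have hitems : (word_list.foldl (fun d word => d.insert word (pvScoreWord word))
        (PySem.Dict.empty : PySem.Dict String Int)).items
        = (w :: t).map (fun v => (v, pvScoreWord v)) := by
      rw [← hL]
      simpa [PySem.Dict.empty, PySem.List.dedup, PySem.Set.ofList, PySem.Set.empty]
        using pvItems_fold word_list []
    cases hS : PySem.List.sorted ((w :: t).map (fun v => (v, pvScoreWord v))) (fun x => x.2) true with
    | nil =>
      exfalso
      have h := (PySem.List.sorted_eq_nil_iff _ (fun x : String × Int => x.2) true).mp hS
      simp at h
    | cons cur rest =>
      have hub : ∀ y ∈ (w :: t).map (fun v => (v, pvScoreWord v)), y.2 ≤ cur.2 :=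
        PySem.List.key_head_sorted_rev_ge _ (fun x : String × Int => x.2) hS
      have hsplit : rest = rest.takeWhile (fun y => y.2 == cur.2)
          ++ rest.dropWhile (fun y => y.2 == cur.2) := (List.takeWhile_append_dropWhile).symm
      have hP' : ∀ p ∈ rest.takeWhile (fun y : String × Int => y.2 == cur.2), p.2 = cur.2 := by
        intro p hp
        have h := List.mem_takeWhile_imp hp
        simpa using h
      have hpwS : (cur :: rest).Pairwise (fun a b : String × Int => b.2 ≤ a.2) := by
        rw [← hS]; exact PySem.List.sorted_pairwise_rev _ (fun x : String × Int => x.2)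
      have hR : ∀ r ∈ rest.dropWhile (fun y : String × Int => y.2 == cur.2), r.2 < cur.2 := by
        cases hR0 : rest.dropWhile (fun y : String × Int => y.2 == cur.2) with
        | nil => intro r hr; cases hr
        | cons r0 R' =>
          have hr0false := pvDropWhile_head_false _ _ _ _ hR0
          have hr0mem : r0 ∈ rest := by
            have h : r0 ∈ rest.takeWhile (fun y : String × Int => y.2 == cur.2)
                ++ rest.dropWhile (fun y : String × Int => y.2 == cur.2) := by
              rw [hR0]; simp
            rw [← hsplit] at h; exact h
          have hr0le : r0.2 ≤ cur.2 := hub r0 ((PySem.List.mem_sorted _ _ _ _).mp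
            (by rw [hS]; exact List.mem_cons_of_mem _ hr0mem))
          have hr0lt : r0.2 < cur.2 := by
            rcases lt_or_eq_of_le hr0le with h | h
            · exact h
            · exfalso; simp [h] at hr0false
          have hpwR : (r0 :: R').Pairwise (fun a b : String × Int => b.2 ≤ a.2) := by
            have h := (List.pairwise_cons.mp hpwS).2
            rw [hsplit, hR0] at h
            exact (List.pairwise_append.mp h).2.1
          intro r hr
          rcases List.mem_cons.mp hr with h | h
          · subst h; exact hr0lt
          · have := List.rel_of_pairwise_cons hpwR h
            omega
      have hA : pvScanA cur rest
          = (pvRunTie cur.1 ((rest.takeWhile (fun y : String × Int => y.2 == cur.2)).map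
              (fun p => p.1)), cur.2) := by
        conv_lhs => rw [hsplit]
        rw [pvScanA_split cur.2 _ cur _ rfl hP' hR,
            pvScanA_runTie cur.2 _ cur rfl hP']
      -- the equal-score prefix is the filtered group, by sort stability
      have hgroup : ((w :: t).map (fun v => (v, pvScoreWord v))).filter
          (fun y => y.2 == cur.2) = cur :: rest.takeWhile (fun y : String × Int => y.2 == cur.2) := by
        rw [← pvFilter_sorted_rev _ cur.2, hS, List.filter_cons]
        simp only [beq_self_eq_true, if_true]
        rw [hsplit, List.filter_append,
            List.filter_eq_self.mpr (fun p hp => by simp [hP' p hp]),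
            List.filter_eq_nil_iff.mpr (fun r hr => by have := hR r hr; simp; omega)]
        simp
      have hGwords : (w :: t).filter (fun v => pvScoreWord v == cur.2)
          = cur.1 :: (rest.takeWhile (fun y : String × Int => y.2 == cur.2)).map (fun p => p.1) := by
        have h1 := congrArg (List.map (fun p : String × Int => p.1)) hgroup
        rw [List.filter_map, List.map_map] at h1
        simpa [Function.comp_def] using h1
      -- ===== the B side =====
      have hsw : pvScoreB w = pvScoreWord w := hscoreL w (by simp)
      have hB := pvBMain t w (pvScoreB w) false rfl (fun h => by simp at h)
      have hfoldconv : ∀ i : Int, t.foldl (fun a v => max a (pvScoreB v)) i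
          = t.foldl (fun a v => max a (pvScoreWord v)) i := by
        intro i
        exact PySem.List.foldl_congr_mem t _ _ i
          (fun acc v hv => by rw [hscoreL v (by simp [hv])])
      have hfilterconv : ∀ k : Int, t.filter (fun v => pvScoreB v == k)
          = t.filter (fun v => pvScoreWord v == k) := by
        intro k
        exact List.filter_congr (fun v hv => by rw [hscoreL v (by simp [hv])])
      -- the head score of the sorted list is the running maximum of the scores
      have hbounds := PySem.List.le_foldl_max_int t pvScoreWord (pvScoreWord w)
      have hubL : ∀ v ∈ w :: t, pvScoreWord v ≤ cur.2 := by
        intro v hv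
        exact hub (v, pvScoreWord v) (List.mem_map_of_mem hv)
      have hcurmem : ∃ u ∈ w :: t, cur = (u, pvScoreWord u) := by
        have h : cur ∈ (w :: t).map (fun v => (v, pvScoreWord v)) :=
          (PySem.List.mem_sorted _ _ _ _).mp (by rw [hS]; simp)
        obtain ⟨u, hu, he⟩ := List.mem_map.mp h
        exact ⟨u, hu, he.symm⟩
      have hMeq : t.foldl (fun a v => max a (pvScoreWord v)) (pvScoreWord w) = cur.2 := by
        obtain ⟨u, huL, hcure⟩ := hcurmem
        have hM1 : cur.2 ≤ t.foldl (fun a v => max a (pvScoreWord v)) (pvScoreWord w) := by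
          rcases List.mem_cons.mp huL with h | h
          · subst h; rw [hcure]; exact hbounds.1
          · rw [hcure]; exact hbounds.2 u h
        have hM2 : t.foldl (fun a v => max a (pvScoreWord v)) (pvScoreWord w) ≤ cur.2 := by
          have hMt' : t.foldl (fun a v => max a (pvScoreWord v)) (pvScoreWord w)
              = (t.map pvScoreWord).foldl max (pvScoreWord w) := by
            rw [List.foldl_map]
          rcases PySem.List.foldl_max_mem (t.map pvScoreWord) (pvScoreWord w) with h | h
          · rw [hMt', h]; exact hubL w (by simp)
          · rw [hMt']
            obtain ⟨v, hv, he⟩ := List.mem_map.mp h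
            rw [← he]; exact hubL v (by simp [hv])
        omega
      -- ===== both sides are the tie-break machine on the max-score group =====
      show get_highest_word_score word_list = _
      unfold get_highest_word_score pvScoreAndSortWords
      simp only [hitems, hS]
      rw [hA]
      have hB2 : ((t.foldl pvStepB (w, pvScoreB w, false)).1,
            (t.foldl pvStepB (w, pvScoreB w, false)).2.1)
          = (if t.foldl (fun a v => max a (pvScoreB v)) (pvScoreB w) = pvScoreB w
             then (pvRunTie w (t.filter (fun v => pvScoreB v == pvScoreB w)), pvScoreB w)
             else (pvHeadRun (t.filter (fun v => pvScoreB v ==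
                     t.foldl (fun a v => max a (pvScoreB v)) (pvScoreB w))),
                   t.foldl (fun a v => max a (pvScoreB v)) (pvScoreB w))) := hB
      unfold get_highest_word_score_alt
      rw [hL]
      show _ = ((t.foldl pvStepB (w, pvScoreB w, false)).1,
        (t.foldl pvStepB (w, pvScoreB w, false)).2.1)
      rw [hB2]
      simp only [hsw]
      rw [hfoldconv]
      rw [hfilterconv, hfilterconv]
      rw [hMeq]
      by_cases hMw : cur.2 = pvScoreWord w
      · rw [if_pos hMw]
        have hsplitG : (w :: t).filter (fun v => pvScoreWord v == cur.2)
            = w :: t.filter (fun v => pvScoreWord v == cur.2) := by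
          rw [List.filter_cons]
          simp [hMw.symm]
        rw [hGwords] at hsplitG
        injection hsplitG with h1 h2
        rw [← hMw, ← h2, ← h1]
      · rw [if_neg hMw]
        have hsplitG : (w :: t).filter (fun v => pvScoreWord v == cur.2)
            = t.filter (fun v => pvScoreWord v == cur.2) := by
          rw [List.filter_cons]
          have hf : (pvScoreWord w == cur.2) = false := by
            have hne2 : cur.2 ≠ pvScoreWord w := hMw
            simp; omega
          simp [hf]
        rw [← hsplitG, hGwords]
        simp [pvHeadRun]
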